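-- pv_equiv track=rewrite | github.com/Chanwoong1/Algorithm-Study | 프로그래머스/lv0/120876. 겹치는 선분의 길이/겹치는 선분의 길이.py | solution
-- ===== SOURCE A (Python) =====
-- def solution(lines):
--     graph = [0] * 200
--     for line in lines :
--         start, end = line[0], line[1] - 1
--         for i in range(start + 100, end + 101) :
--             graph[i] += 1
--     answer = [1 for i in graph if i > 1]
--     return sum(answer)
-- ===== SOURCE B (Python) =====
-- def solution(lines):
--     # cell-major: for each unit cell, count covering segments; no mutable graph array
--     count = 0
--     for x in range(-100, 100):
--         covered = 0
--         for line in lines: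
--             if line[0] <= x < line[1]:
--                 covered += 1
--         if covered > 1:
--             count += 1
--     return count
-- ===== Notes on version B (the rewrite author's own statement) =====
-- stated objective: simpler
-- what changed: Replaces the mutable 200-cell graph array that each segment increments (then a filter/sum pass) with a cell-major double loop: for each of the 200 unit cells count the segments covering it directly, no auxiliary array.
-- outside the precondition, e.g. on solution([[-150, -50], [-150, -50]]): A returns 100, B returns 50; on solution([[0, 150], [0, 150]]): A raises IndexError, B returns 100
import Mathlib
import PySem

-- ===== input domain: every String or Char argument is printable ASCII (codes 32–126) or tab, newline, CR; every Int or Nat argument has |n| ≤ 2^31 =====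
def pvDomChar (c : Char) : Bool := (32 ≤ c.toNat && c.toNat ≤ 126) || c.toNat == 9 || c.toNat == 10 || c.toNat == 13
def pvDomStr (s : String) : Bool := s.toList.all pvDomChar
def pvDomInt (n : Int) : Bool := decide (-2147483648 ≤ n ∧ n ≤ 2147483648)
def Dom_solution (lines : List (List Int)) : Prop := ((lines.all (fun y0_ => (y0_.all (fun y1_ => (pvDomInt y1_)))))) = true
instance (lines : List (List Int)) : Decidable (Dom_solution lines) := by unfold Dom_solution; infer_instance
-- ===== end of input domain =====

-- B replaces A's mutable 200-cell array (segment-major increments, then a filter/sum pass)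
-- with a cell-major double loop counting, for each unit cell, the segments that cover it.

-- ===== PORT A =====
def solution (lines : List (List Int)) : Int :=
  let graph : List Int := lines.foldl (fun g line =>
      let start := PySem.List.pyGetD line 0 0
      let e := PySem.List.pyGetD line 1 0 - 1
      (PySem.List.pyRange (start + 100) (e + 101) 1).foldl
        (fun g i => PySem.List.pySetD g i (PySem.List.pyGetD g i 0 + 1)) g)
    (List.replicate 200 (0 : Int))
  ((graph.filter (fun i => 1 < i)).map (fun _ => (1 : Int))).sum

-- ===== PORT B =====
def solution_alt (lines : List (List Int)) : Int :=
  (PySem.List.pyRange (-100) 100 1).foldl (fun count x =>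
    let covered := lines.foldl (fun c line =>
        if PySem.List.pyGetD line 0 0 ≤ x ∧ x < PySem.List.pyGetD line 1 0 then c + 1 else c)
      (0 : Int)
    if 1 < covered then count + 1 else count) 0

-- ===== PRECONDITION & SPEC =====
-- Pre_ keeps the natural domain of the puzzle: each line has the two endpoints and a
-- nonempty segment lies within [-100, 100]. It excludes inputs where A raises IndexError
-- (a segment reaching past coordinate 100, or a too-short line) and inputs where A's value
-- comes from Python negative-index wraparound (a segment starting below -200+?; any start
-- below -100 with start < end), on which A's value is an artefact of its implementation.
def Pre_solution (lines : List (List Int)) : Prop :=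
  ∀ l ∈ lines, 2 ≤ l.length ∧
    (l.getD 1 0 ≤ l.getD 0 0 ∨ (-100 ≤ l.getD 0 0 ∧ l.getD 1 0 ≤ 100))
instance (lines : List (List Int)) : Decidable (Pre_solution lines) := by
  unfold Pre_solution; infer_instance

def pvWitness_solution : List (List Int) := [[0, 5], [3, 8]]

def Spec_solution (lines : List (List Int)) (out : Int) : Prop := out = solution_alt lines
instance (lines : List (List Int)) (out : Int) : Decidable (Spec_solution lines out) := by
  unfold Spec_solution; infer_instance

-- ===== CLAIM (what is proved, stated in full; the proofs are below) =====
def Claim_equal_solution : Prop :=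
  ∀ (lines : List (List Int)), Dom_solution lines → Pre_solution lines →
    Spec_solution lines (solution lines)

-- ===== LEMMAS AND PROOFS =====

-- coverage count of cell x, exactly B's inner fold
def covf (lines : List (List Int)) (x : Int) : Int :=
  lines.foldl (fun c line =>
      if PySem.List.pyGetD line 0 0 ≤ x ∧ x < PySem.List.pyGetD line 1 0 then c + 1 else c)
    (0 : Int)

theorem covf_shift (lines : List (List Int)) (x : Int) (c : Int) :
    lines.foldl (fun c line =>
        if PySem.List.pyGetD line 0 0 ≤ x ∧ x < PySem.List.pyGetD line 1 0 then c + 1 else c) c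
      = c + covf lines x := by
  induction lines generalizing c with
  | nil => simp [covf]
  | cons l ls ih =>
    simp only [covf, List.foldl_cons] at *
    rw [ih, ih (if PySem.List.pyGetD l 0 0 ≤ x ∧ x < PySem.List.pyGetD l 1 0 then (0:Int) + 1 else 0)]
    split <;> omega

theorem covf_cons (l : List Int) (ls : List (List Int)) (x : Int) :
    covf (l :: ls) x =
      (if PySem.List.pyGetD l 0 0 ≤ x ∧ x < PySem.List.pyGetD l 1 0 then 1 else 0) + covf ls x := by
  simp only [covf, List.foldl_cons]
  rw [covf_shift]
  simp only [covf]
  split <;> omega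

-- the inner loop of A preserves the graph's length
theorem innerLoop_length (r : List Int) (g : List Int) :
    (r.foldl (fun g i => PySem.List.pySetD g i (PySem.List.pyGetD g i 0 + 1)) g).length
      = g.length := by
  induction r generalizing g with
  | nil => rfl
  | cons i r ih => simp [List.foldl_cons, ih, PySem.List.length_pySetD]

-- pointwise effect of A's inner loop over range(a, b), bounded case
theorem innerLoop_getD_aux (n : Nat) :
    ∀ (a b : Int), (b - a).toNat = n → 0 ≤ a → b ≤ 200 →
    ∀ (g : List Int), g.length = 200 → ∀ (k : Nat), k < 200 →
    ((PySem.List.pyRange a b 1).foldl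
        (fun g i => PySem.List.pySetD g i (PySem.List.pyGetD g i 0 + 1)) g).getD k 0
      = g.getD k 0 + (if a ≤ (k : Int) ∧ (k : Int) < b then 1 else 0) := by
  induction n with
  | zero =>
    intro a b hn ha hb g hg k hk
    rw [PySem.List.pyRange_one_eq_nil (by omega)]
    simp only [List.foldl_nil]
    have : ¬ (a ≤ (k : Int) ∧ (k : Int) < b) := by omega
    simp [this]
  | succ n ih =>
    intro a b hn ha hb g hg k hk
    have hab : a < b := by omega
    rw [PySem.List.pyRange_one_cons hab, List.foldl_cons]
    have hset : PySem.List.pySetD g a (PySem.List.pyGetD g a 0 + 1)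
        = g.set a.toNat (PySem.List.pyGetD g a 0 + 1) :=
      PySem.List.pySetD_of_nonneg g _ ha
    rw [hset, ih (a + 1) b (by omega) (by omega) hb _ (by simp [hg]) k hk]
    have halen : a.toNat < g.length := by omega
    have hgd : PySem.List.pyGetD g a 0 = g.getD a.toNat 0 := by
      rw [show a = ((a.toNat : ℕ) : ℤ) from by omega, PySem.List.pyGetD_natCast]
      simp
      rw [max_eq_left ha]
    by_cases hka : k = a.toNat
    · have h1 : (g.set a.toNat (PySem.List.pyGetD g a 0 + 1)).getD k 0
          = PySem.List.pyGetD g a 0 + 1 := by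
        rw [hka, List.getD_eq_getElem _ 0 (by simpa using halen)]
        simp
      rw [h1, hgd]
      have hc1 : ¬ (a + 1 ≤ (k : Int) ∧ (k : Int) < b) := by omega
      have hc2 : a ≤ (k : Int) ∧ (k : Int) < b := by omega
      rw [if_neg hc1, if_pos hc2, hka]
      omega
    · have h1 : (g.set a.toNat (PySem.List.pyGetD g a 0 + 1)).getD k 0 = g.getD k 0 := by
        unfold List.getD
        rw [List.getElem?_set_ne (by omega)]
      rw [h1]
      have hne : (k : Int) ≠ a := by omega
      by_cases hc : a + 1 ≤ (k : Int) ∧ (k : Int) < b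
      · have hc' : a ≤ (k : Int) ∧ (k : Int) < b := by omega
        rw [if_pos hc, if_pos hc']
      · have hc' : ¬ (a ≤ (k : Int) ∧ (k : Int) < b) := by omega
        rw [if_neg hc, if_neg hc']

-- pointwise effect of A's inner loop, with the empty-range alternative allowed
theorem innerLoop_getD (a b : Int)
    (hab : b ≤ a ∨ (0 ≤ a ∧ b ≤ 200)) (g : List Int) (hg : g.length = 200)
    (k : Nat) (hk : k < 200) :
    ((PySem.List.pyRange a b 1).foldl
        (fun g i => PySem.List.pySetD g i (PySem.List.pyGetD g i 0 + 1)) g).getD k 0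
      = g.getD k 0 + (if a ≤ (k : Int) ∧ (k : Int) < b then 1 else 0) := by
  rcases hab with h | ⟨ha, hb⟩
  · rw [PySem.List.pyRange_one_eq_nil h]
    have : ¬ (a ≤ (k : Int) ∧ (k : Int) < b) := by omega
    simp [this]
  · exact innerLoop_getD_aux (b - a).toNat a b rfl ha hb g hg k hk

-- A's outer loop computes coverage counts pointwise
theorem outerLoop_getD (lines : List (List Int)) (hpre : Pre_solution lines)
    (g : List Int) (hg : g.length = 200) (k : Nat) (hk : k < 200) :
    (lines.foldl (fun g line =>
        let start := PySem.List.pyGetD line 0 0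
        let e := PySem.List.pyGetD line 1 0 - 1
        (PySem.List.pyRange (start + 100) (e + 101) 1).foldl
          (fun g i => PySem.List.pySetD g i (PySem.List.pyGetD g i 0 + 1)) g) g).getD k 0
      = g.getD k 0 + covf lines ((k : Int) - 100) := by
  induction lines generalizing g with
  | nil => simp [covf]
  | cons l ls ihl =>
    have hl := hpre l (List.mem_cons_self ..)
    have hpre' : Pre_solution ls := fun m hm => hpre m (List.mem_cons_of_mem _ hm)
    simp only [List.foldl_cons]
    have h0 : PySem.List.pyGetD l 0 0 = l.getD 0 0 := by simp [pysem]
    have h1 : PySem.List.pyGetD l 1 0 = l.getD 1 0 := by simp [pysem]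
    have hglen : ((PySem.List.pyRange (PySem.List.pyGetD l 0 0 + 100)
          (PySem.List.pyGetD l 1 0 - 1 + 101) 1).foldl
        (fun g i => PySem.List.pySetD g i (PySem.List.pyGetD g i 0 + 1)) g).length = 200 := by
      rw [innerLoop_length]; exact hg
    rw [ihl hpre' _ hglen,
        innerLoop_getD _ _ (by rw [h0, h1]; omega) g hg k hk, covf_cons]
    rw [h0, h1]
    by_cases hc : l.getD 0 0 ≤ (k : Int) - 100 ∧ (k : Int) - 100 < l.getD 1 0
    · have hc' : l.getD 0 0 + 100 ≤ (k : Int) ∧ (k : Int) < l.getD 1 0 - 1 + 101 := by omega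
      simp only [hc, hc']
      ring
    · have hc' : ¬ (l.getD 0 0 + 100 ≤ (k : Int) ∧ (k : Int) < l.getD 1 0 - 1 + 101) := by omega
      simp only [hc, hc']
      ring

-- the graph A builds keeps length 200 through the outer loop
theorem outerLoop_length (lines : List (List Int)) (g : List Int) :
    (lines.foldl (fun g line =>
        let start := PySem.List.pyGetD line 0 0
        let e := PySem.List.pyGetD line 1 0 - 1
        (PySem.List.pyRange (start + 100) (e + 101) 1).foldl
          (fun g i => PySem.List.pySetD g i (PySem.List.pyGetD g i 0 + 1)) g) g).length
      = g.length := by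
  induction lines generalizing g with
  | nil => rfl
  | cons l ls ih => simp only [List.foldl_cons]; rw [ih, innerLoop_length]

-- counting >1 entries: A's filter/map/sum form as a foldl counter
theorem count_shift (xs : List Int) (c : Int) :
    xs.foldl (fun c i => if 1 < i then c + 1 else c) c
      = c + xs.foldl (fun c i => if 1 < i then c + 1 else c) 0 := by
  induction xs generalizing c with
  | nil => simp
  | cons x xs ih =>
    simp only [List.foldl_cons]
    rw [ih, ih (if 1 < x then (0:Int) + 1 else 0)]
    split <;> omega

theorem filter_sum_count (xs : List Int) :
    ((xs.filter (fun i => 1 < i)).map (fun _ => (1 : Int))).sum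
      = xs.foldl (fun c i => if 1 < i then c + 1 else c) 0 := by
  induction xs with
  | nil => simp
  | cons x xs ih =>
    simp only [List.filter_cons, List.foldl_cons]
    rw [count_shift]
    by_cases h : 1 < x <;> simp [h] at ih ⊢ <;> omega

-- ===== VERDICT (by name: the statement is the Claim_ definition above) =====
theorem solution_spec : Claim_equal_solution := by
  intro lines _ hpre
  unfold Spec_solution
  show solution lines = solution_alt lines
  unfold solution
  have hgraph : (lines.foldl (fun g line =>
      let start := PySem.List.pyGetD line 0 0
      let e := PySem.List.pyGetD line 1 0 - 1
      (PySem.List.pyRange (start + 100) (e + 101) 1).foldl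
        (fun g i => PySem.List.pySetD g i (PySem.List.pyGetD g i 0 + 1)) g)
      (List.replicate 200 (0 : Int)))
      = (List.range 200).map (fun k : Nat => covf lines ((k : Int) - 100)) := by
    apply List.ext_getElem
    · rw [outerLoop_length, List.length_replicate, List.length_map, List.length_range]
    · intro k hk1 hk2
      have hk : k < 200 := by
        rw [outerLoop_length, List.length_replicate] at hk1; exact hk1
      have hmain := outerLoop_getD lines hpre (List.replicate 200 (0 : Int))
        List.length_replicate k hk
      have h0 : (List.replicate 200 (0 : Int)).getD k 0 = 0 := by
        rw [List.getD_eq_getElem _ 0 (by rw [List.length_replicate]; exact hk),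
            List.getElem_replicate]
      rw [List.getD_eq_getElem _ 0 hk1, h0, zero_add] at hmain
      rw [hmain, List.getElem_map, List.getElem_range]
  rw [hgraph, filter_sum_count, List.foldl_map]
  have hB : solution_alt lines
      = (PySem.List.pyRange (-100) 100 1).foldl
          (fun count x => if 1 < covf lines x then count + 1 else count) 0 := rfl
  rw [hB, PySem.List.pyRange_one,
      show ((100 : Int) - (-100)).toNat = 200 from by decide, List.foldl_map]
  congr 1
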